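-- pv_equiv track=rewrite | github.com/nlpsoc/Paraphrase-In-Dialog | src/paraphrase/interview_data.py | _get_start_pos
-- ===== SOURCE A (Python) =====
-- from typing import List, Dict
--
-- def _get_start_pos(index_list: List[int]):
--     """
--         get the starting numbers of consecutive sequences
--             [4, 6, 8, 10, 11, 12, 14] --> [4, 6, 8, 10, 14]
--     :param index_list:
--     :return:
--     """
--     prev_elem = index_list[0]
--     new_list = [prev_elem]
--     for elem in index_list[1:]:
--         if prev_elem + 1 != elem:
--             new_list.append(elem)
--         prev_elem = elem
--     return new_list
-- ===== SOURCE B (Python) =====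
-- def _get_start_pos(index_list):
--     # divide and conquer: solve each half, then merge; the right half's first
--     # start (its first element) is dropped iff it continues the left half's run
--     if len(index_list) <= 1:
--         return list(index_list)
--     mid = len(index_list) // 2
--     left = _get_start_pos(index_list[:mid])
--     right = _get_start_pos(index_list[mid:])
--     if index_list[mid - 1] + 1 == index_list[mid]:
--         return left + right[1:]
--     return left + right
-- ===== Notes on version B (the rewrite author's own statement) =====
-- stated objective: alternative
-- what changed: Replaces A's single left-to-right prev/append scan with a divide-and-conquer recursion: solve both halves independently and merge, dropping the right half's first start when the runs join across the midpoint.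
import Mathlib
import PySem

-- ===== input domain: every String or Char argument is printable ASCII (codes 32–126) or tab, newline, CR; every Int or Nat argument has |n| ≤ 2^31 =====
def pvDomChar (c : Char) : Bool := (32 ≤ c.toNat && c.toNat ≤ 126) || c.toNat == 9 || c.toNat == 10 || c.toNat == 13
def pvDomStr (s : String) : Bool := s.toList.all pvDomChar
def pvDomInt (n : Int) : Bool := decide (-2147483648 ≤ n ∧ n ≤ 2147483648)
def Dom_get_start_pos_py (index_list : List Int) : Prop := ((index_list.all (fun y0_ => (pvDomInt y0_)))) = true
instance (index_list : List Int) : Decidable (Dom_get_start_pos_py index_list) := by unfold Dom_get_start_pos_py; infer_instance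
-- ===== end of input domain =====

-- B replaces A's linear prev/append scan by a divide-and-conquer recursion on the two
-- halves of the list with a merge at the midpoint; alternative decomposition, same results.
-- ===== PORT A =====
def get_start_pos_py (index_list : List Int) : List Int :=
  match index_list with
  | [] => []   -- unreachable under Pre_: index_list[0] raises IndexError in Python
  | prev0 :: tail =>
    -- prev_elem = index_list[0]; new_list = [prev_elem]; for elem in index_list[1:]: ...
    (tail.foldl
      (fun (st : Int × List Int) elem =>
        (elem, if st.1 + 1 != elem then st.2 ++ [elem] else st.2))
      (prev0, [prev0])).2

-- ===== PORT B =====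
-- xs[mid-1] / xs[mid] are in range whenever this branch runs (2 ≤ len, 1 ≤ mid < len),
-- so List.getD is exact for Python's indexing here; right[1:] is List.tail.
def get_start_pos_py_alt (index_list : List Int) : List Int :=
  if index_list.length ≤ 1 then index_list
  else
    let mid := index_list.length / 2
    let left := get_start_pos_py_alt (index_list.take mid)
    let right := get_start_pos_py_alt (index_list.drop mid)
    if index_list.getD (mid - 1) 0 + 1 = index_list.getD mid 0 then
      left ++ right.tail
    else
      left ++ right
termination_by index_list.length
decreasing_by all_goals simp [List.length_take, List.length_drop]; omega

-- ===== PRECONDITION & SPEC =====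
-- Pre_ excludes exactly the empty list, on which A raises IndexError (index_list[0]).
def Pre_get_start_pos_py (index_list : List Int) : Prop := index_list ≠ []
instance (index_list : List Int) : Decidable (Pre_get_start_pos_py index_list) := by
  unfold Pre_get_start_pos_py; infer_instance
def pvWitness_get_start_pos_py : List Int := ([4, 6, 8, 10, 11, 12, 14])

def Spec_get_start_pos_py (index_list : List Int) (out : List Int) : Prop := out = get_start_pos_py_alt index_list
instance (index_list : List Int) (out : List Int) : Decidable (Spec_get_start_pos_py index_list out) := by unfold Spec_get_start_pos_py; infer_instance

-- ===== CLAIM (what is proved, stated in full; the proofs are below) =====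
def Claim_equal_get_start_pos_py : Prop := ∀ (index_list : List Int), Dom_get_start_pos_py index_list → Pre_get_start_pos_py index_list → Spec_get_start_pos_py index_list (get_start_pos_py index_list)

-- ===== LEMMAS AND PROOFS =====
-- common characterisation: the starts contributed by tail t when the previous element is prev
def pvStarts (prev : Int) : List Int → List Int
  | [] => []
  | e :: t => (if prev + 1 ≠ e then [e] else []) ++ pvStarts e t

def pvRunStarts : List Int → List Int
  | [] => []
  | h :: t => h :: pvStarts h t

theorem a_fold_spec (t : List Int) (prev : Int) (acc : List Int) :
    (t.foldl
      (fun (st : Int × List Int) elem =>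
        (elem, if st.1 + 1 != elem then st.2 ++ [elem] else st.2))
      (prev, acc)).2 = acc ++ pvStarts prev t := by
  induction t generalizing prev acc with
  | nil => simp [pvStarts]
  | cons e t ih =>
    simp only [List.foldl_cons, pvStarts, ih]
    by_cases h : prev + 1 = e <;> simp [h]

theorem pvStarts_append (prev : Int) (t r : List Int) :
    pvStarts prev (t ++ r) = pvStarts prev t ++ pvStarts ((prev :: t).getLast (by simp)) r := by
  induction t generalizing prev with
  | nil => simp [pvStarts]
  | cons e t ih => simp [pvStarts, ih, List.getLast_cons]

theorem pvRunStarts_append (l r : List Int) (hl : l ≠ []) (hr : r ≠ []) :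
    pvRunStarts (l ++ r) =
      pvRunStarts l ++
        (if l.getLast hl + 1 = r.headD 0 then (pvRunStarts r).tail else pvRunStarts r) := by
  rcases List.exists_cons_of_ne_nil hl with ⟨h, t, rfl⟩
  rcases List.exists_cons_of_ne_nil hr with ⟨rh, rt, rfl⟩
  simp only [List.cons_append, pvRunStarts, List.headD_cons]
  rw [pvStarts_append h t (rh :: rt)]
  by_cases hb : (h :: t).getLast (by simp) + 1 = rh <;>
    simp [pvStarts, hb]

theorem b_eq_runStarts (n : Nat) :
    ∀ xs : List Int, xs.length ≤ n → get_start_pos_py_alt xs = pvRunStarts xs := by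
  induction n with
  | zero =>
    intro xs hxs
    have : xs = [] := List.eq_nil_of_length_eq_zero (Nat.le_zero.mp hxs)
    subst this
    simp [get_start_pos_py_alt, pvRunStarts]
  | succ n ih =>
    intro xs hxs
    by_cases hlen : xs.length ≤ 1
    · match xs, hlen with
      | [], _ => simp [get_start_pos_py_alt, pvRunStarts]
      | [a], _ => simp [get_start_pos_py_alt, pvRunStarts, pvStarts]
    · push Not at hlen
      rw [get_start_pos_py_alt, if_neg (by omega)]
      set mid := xs.length / 2 with hmid
      have h1 : 1 ≤ mid := by omega
      have h2 : mid < xs.length := by omega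
      have htake : (xs.take mid).length = mid := by simp; omega
      have hdrop : (xs.drop mid).length = xs.length - mid := by simp
      change (if xs.getD (mid - 1) 0 + 1 = xs.getD mid 0 then
          get_start_pos_py_alt (xs.take mid) ++ (get_start_pos_py_alt (xs.drop mid)).tail
        else
          get_start_pos_py_alt (xs.take mid) ++ get_start_pos_py_alt (xs.drop mid)) = pvRunStarts xs
      rw [ih (xs.take mid) (by omega), ih (xs.drop mid) (by omega)]
      have htne : xs.take mid ≠ [] := by
        intro h; rw [h] at htake; simp at htake; omega
      have hdne : xs.drop mid ≠ [] := by
        intro h; rw [h] at hdrop; simp at hdrop; omega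
      have hsplit : xs = xs.take mid ++ xs.drop mid := (List.take_append_drop mid xs).symm
      have hlast : (xs.take mid).getLast htne = xs.getD (mid - 1) 0 := by
        rw [List.getLast_eq_getElem]
        rw [List.getD_eq_getElem xs 0 (by omega)]
        simp [htake]
      have hhead : (xs.drop mid).headD 0 = xs.getD mid 0 := by
        rw [List.headD_eq_head?, List.head?_eq_getElem?, List.getElem?_drop, Nat.add_zero,
            List.getD_eq_getElem?_getD]
      conv_rhs => rw [hsplit]
      rw [pvRunStarts_append _ _ htne hdne, hlast, hhead]
      split_ifs <;> rfl

-- ===== VERDICT (by name: the statement is the Claim_ definition above) =====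
theorem get_start_pos_py_spec : Claim_equal_get_start_pos_py := by
  intro xs _ hpre
  unfold Spec_get_start_pos_py
  rw [b_eq_runStarts xs.length xs (le_refl _)]
  rcases List.exists_cons_of_ne_nil hpre with ⟨h, t, rfl⟩
  show (t.foldl
      (fun (st : Int × List Int) elem =>
        (elem, if st.1 + 1 != elem then st.2 ++ [elem] else st.2))
      (h, [h])).2 = pvRunStarts (h :: t)
  rw [a_fold_spec]
  simp [pvRunStarts]
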